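-- pv_equiv track=rewrite | github.com/lukaswilde/advent-of-code-2024 | src/day19/main.py | calculate_possibilities
-- ===== SOURCE A (Python) =====
-- def calculate_possibilities(patterns: set[str], designs: list[str]) -> int:
--     cache: dict[str, int] = dict()
--
--     def num_possibilities(design: str) -> int:
--         if design in cache:
--             return cache[design]
--
--         if design == '':
--             return 0
--
--         count_possible = 0
--         for pattern in patterns:
--             if not design.startswith(pattern):
--                 continue
--
--             if pattern == design:
--                 count_possible += 1
--
--             suffix = design.removeprefix(pattern)
--             res = num_possibilities(suffix)
--             count_possible += res
--
--             if suffix not in cache: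
--                 cache[suffix] = res
--
--         return count_possible
--
--     return sum([num_possibilities(design) for design in designs])
-- ===== SOURCE B (Python) =====
-- def calculate_possibilities(patterns, designs):
--     total = 0
--     patterns = list(patterns)
--     for design in designs:
--         if design == '':
--             continue
--         n = len(design)
--         dp = [0] * (n + 1)
--         dp[n] = 1
--         for i in range(n - 1, -1, -1):
--             dp[i] = sum(dp[i + len(p)] for p in patterns if design.startswith(p, i))
--         total += dp[0]
--     return total
-- ===== Notes on version B (the rewrite author's own statement) =====
-- stated objective: alternative
-- what changed: Replaces the recursive suffix memoization with a shared string-keyed cache by a per-design bottom-up integer DP table indexed by position (dp[i] = ways to tile design[i:]), summed over designs.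
import Mathlib
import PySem

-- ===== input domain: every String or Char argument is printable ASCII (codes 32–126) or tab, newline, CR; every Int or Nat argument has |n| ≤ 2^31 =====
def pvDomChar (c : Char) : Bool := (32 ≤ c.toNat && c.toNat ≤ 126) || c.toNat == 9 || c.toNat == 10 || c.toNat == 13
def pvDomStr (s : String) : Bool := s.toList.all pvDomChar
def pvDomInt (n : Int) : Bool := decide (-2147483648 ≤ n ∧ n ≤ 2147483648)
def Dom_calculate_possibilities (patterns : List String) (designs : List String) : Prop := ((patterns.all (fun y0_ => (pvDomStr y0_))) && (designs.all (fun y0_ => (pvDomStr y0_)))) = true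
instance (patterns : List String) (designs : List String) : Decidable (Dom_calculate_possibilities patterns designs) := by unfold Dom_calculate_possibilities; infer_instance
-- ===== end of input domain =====

-- B replaces A's recursive memoization (shared string-keyed cache) by a per-design
-- bottom-up DP table indexed by position; alternative decomposition, same asymptotic cost.

-- ===== PORT A =====
-- design.removeprefix(pattern)
def pvRemoveprefix (s p : String) : String :=
  if PySem.Str.startswith s p then String.ofList (s.toList.drop p.toList.length) else s

-- the inner recursive 'num_possibilities', threading the mutable cache; fuel models
-- Python's recursion depth (fuel 0 = RecursionError, unreachable under Pre_)
def pvNumPoss (patterns : List String) : Nat → String → PySem.Dict String Int → Int × PySem.Dict String Int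
  | 0, _, cache => (0, cache)
  | fuel+1, design, cache =>
    match cache.get? design with
    | some v => (v, cache)
    | none =>
      if design = "" then (0, cache)
      else
        patterns.foldl (fun acc pattern =>
          if PySem.Str.startswith design pattern then
            let cnt1 : Int := if pattern = design then acc.1 + 1 else acc.1
            let suffix := pvRemoveprefix design pattern
            let r := pvNumPoss patterns fuel suffix acc.2
            let cache' := if (r.2.get? suffix).isSome then r.2 else r.2.insert suffix r.1
            (cnt1 + r.1, cache')
          else acc) (0, cache)

def calculate_possibilities (patterns : List String) (designs : List String) : Int :=
  (designs.foldl (fun (acc : Int × PySem.Dict String Int) design =>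
      let r := pvNumPoss patterns (design.toList.length + 1) design acc.2
      (acc.1 + r.1, r.2)) (0, PySem.Dict.empty)).1

-- ===== PORT B =====
-- one pass of 'dp[i] = sum(dp[i+len(p)] for p in patterns if design.startswith(p, i))';
-- design.startswith(p, i) with 0 ≤ i ≤ len(design) is exactly p.toList.isPrefixOf on the dropped list
def pvDpStep (patterns : List String) (d : List Char) (dp : List Int) (i : Nat) : List Int :=
  dp.set i (patterns.foldl (fun s p =>
    if PySem.Chars.startswith (d.drop i) p.toList then s + dp.getD (i + p.toList.length) 0 else s) 0)

-- range(n-1,-1,-1) enumerates n-1,…,0 = (List.range n).reverse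
def calculate_possibilities_alt (patterns : List String) (designs : List String) : Int :=
  designs.foldl (fun total design =>
    if design = "" then total
    else
      let d := design.toList
      let n := d.length
      let dp0 := (List.replicate (n+1) (0:Int)).set n 1
      let dp := ((List.range n).reverse).foldl (pvDpStep patterns d) dp0
      total + dp.getD 0 0) 0

-- ===== PRECONDITION & SPEC =====
-- Pre_ excludes exactly the inputs where A raises: an empty pattern together with a
-- nonempty design makes num_possibilities recurse on the unchanged design (RecursionError).
def Pre_calculate_possibilities (patterns : List String) (designs : List String) : Prop :=
  ¬ ("" ∈ patterns ∧ ∃ d ∈ designs, d ≠ "")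
instance (patterns : List String) (designs : List String) : Decidable (Pre_calculate_possibilities patterns designs) := by unfold Pre_calculate_possibilities; infer_instance

def pvWitness_calculate_possibilities : List String × List String := (["a", "bc"], ["abc", "a", ""])

def Spec_calculate_possibilities (patterns : List String) (designs : List String) (out : Int) : Prop := out = calculate_possibilities_alt patterns designs
instance (patterns : List String) (designs : List String) (out : Int) : Decidable (Spec_calculate_possibilities patterns designs out) := by unfold Spec_calculate_possibilities; infer_instance

-- ===== CLAIM (what is proved, stated in full; the proofs are below) =====
def Claim_equal_calculate_possibilities : Prop := ∀ (patterns : List String) (designs : List String), Dom_calculate_possibilities patterns designs → Pre_calculate_possibilities patterns designs → Spec_calculate_possibilities patterns designs (calculate_possibilities patterns designs)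

-- ===== LEMMAS AND PROOFS =====

-- pure value of a suffix: number of ways to write it as a concatenation of ≥1 patterns,
-- with fuel (pvG f d is the true value whenever d.length < f and no pattern is empty)
def pvG (patterns : List String) : Nat → List Char → Int
  | 0, _ => 0
  | f+1, d =>
    if d = [] then 1 else
      patterns.foldl (fun s p =>
        if PySem.Chars.startswith d p.toList then s + pvG patterns f (d.drop p.toList.length) else s) 0

theorem pvG_fuel (patterns : List String) (hP : ∀ p ∈ patterns, p ≠ "") :
    ∀ (f₁ : Nat) (d : List Char) (f₂ : Nat), d.length < f₁ → d.length < f₂ →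
      pvG patterns f₁ d = pvG patterns f₂ d := by
  intro f₁
  induction f₁ with
  | zero => intro d f₂ h; omega
  | succ f ih =>
    intro d f₂ h1 h2
    match f₂, h2 with
    | g+1, h2 =>
      by_cases hd : d = []
      · simp [pvG, hd]
      · simp only [pvG, hd]
        apply PySem.List.foldl_congr_mem'
        intro p hp acc
        by_cases hs : PySem.Chars.startswith d p.toList
        · have hpre : p.toList <+: d := (PySem.Chars.startswith_iff _ _).mp hs
          have hlen : p.toList.length ≤ d.length := hpre.length_le
          have hppos : 0 < p.toList.length := by
            have := hP p hp
            cases hl : p.toList with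
            | nil => exact absurd (by ext1; simp [hl]) this
            | cons a l => simp
          have hdpos : 0 < d.length := List.length_pos_iff.mpr hd
          have : (d.drop p.toList.length).length < f ∧ (d.drop p.toList.length).length < g := by
            simp only [List.length_drop]; omega
          rw [hs]
          simp only [if_true]
          rw [ih (d.drop p.toList.length) g this.1 this.2]
        · simp [hs]

-- A's value of a design
def pvAV (patterns : List String) (s : String) : Int :=
  if s = "" then 0 else pvG patterns (s.toList.length + 1) s.toList

def pvCacheOK (patterns : List String) (c : PySem.Dict String Int) : Prop :=
  ∀ s v, c.get? s = some v → v = pvAV patterns s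

-- the loop body of num_possibilities, named so the fold lemma can speak about it
def pvStepA (patterns : List String) (f : Nat) (s : String)
    (acc : Int × PySem.Dict String Int) (pattern : String) : Int × PySem.Dict String Int :=
  if PySem.Str.startswith s pattern then
    let cnt1 : Int := if pattern = s then acc.1 + 1 else acc.1
    let suffix := pvRemoveprefix s pattern
    let r := pvNumPoss patterns f suffix acc.2
    let cache' := if (r.2.get? suffix).isSome then r.2 else r.2.insert suffix r.1
    (cnt1 + r.1, cache')
  else acc

theorem pvNumPoss_succ (patterns : List String) (f : Nat) (s : String) (c : PySem.Dict String Int) :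
    pvNumPoss patterns (f+1) s c =
      match c.get? s with
      | some v => (v, c)
      | none => if s = "" then (0, c) else patterns.foldl (pvStepA patterns f s) (0, c) := rfl

-- the contribution of one pattern to num_possibilities(s)
def pvContrib (patterns : List String) (s p : String) : Int :=
  if PySem.Str.startswith s p then (if p = s then 1 else 0) + pvAV patterns (pvRemoveprefix s p) else 0

theorem pvFold_spec (patterns : List String) (hP : ∀ p ∈ patterns, p ≠ "") (f : Nat) (s : String)
    (hIH : ∀ (s' : String) (c : PySem.Dict String Int), pvCacheOK patterns c → s'.toList.length < f →
      (pvNumPoss patterns f s' c).1 = pvAV patterns s' ∧ pvCacheOK patterns (pvNumPoss patterns f s' c).2)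
    (hs : s ≠ "") (hsf : s.toList.length < f + 1) :
    ∀ (l : List String), (∀ p ∈ l, p ∈ patterns) → ∀ (cnt : Int) (c : PySem.Dict String Int),
      pvCacheOK patterns c →
      (l.foldl (pvStepA patterns f s) (cnt, c)).1 = cnt + (l.map (pvContrib patterns s)).sum ∧
      pvCacheOK patterns (l.foldl (pvStepA patterns f s) (cnt, c)).2 := by
  intro l
  induction l with
  | nil => intro _ cnt c hC; refine ⟨by simp, ?_⟩; simpa using hC
  | cons p l ih =>
    intro hmem cnt c hC
    have hp : p ∈ patterns := hmem p (by simp)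
    have hpne : p ≠ "" := hP p hp
    rw [List.foldl_cons]
    by_cases hsw2 : PySem.Chars.startswith s.toList p.toList = true
    · -- pattern matches at the front
      have hpre : p.toList <+: s.toList := (PySem.Chars.startswith_iff _ _).mp hsw2
      have hppos : 0 < p.toList.length := by
        cases hl : p.toList with
        | nil => exact absurd (String.toList_inj.mp (by simp [hl])) hpne
        | cons a t => simp
      have hspos : 0 < s.toList.length := by
        cases hl : s.toList with
        | nil => exact absurd (String.toList_inj.mp (by simp [hl])) hs
        | cons a t => simp
      have hsuf : (pvRemoveprefix s p).toList = s.toList.drop p.toList.length := by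
        simp [pvRemoveprefix, hsw2]
      have hsuflen : (pvRemoveprefix s p).toList.length < f := by
        rw [hsuf, List.length_drop]
        have := hpre.length_le
        omega
      have hr := hIH (pvRemoveprefix s p) c hC hsuflen
      have hcache' : pvCacheOK patterns
          (if ((pvNumPoss patterns f (pvRemoveprefix s p) c).2.get? (pvRemoveprefix s p)).isSome
           then (pvNumPoss patterns f (pvRemoveprefix s p) c).2
           else (pvNumPoss patterns f (pvRemoveprefix s p) c).2.insert (pvRemoveprefix s p)
                  (pvNumPoss patterns f (pvRemoveprefix s p) c).1) := by
        split
        · exact hr.2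
        · intro t w hw
          rw [PySem.Dict.get?_insert] at hw
          split at hw
          · rename_i ht; subst ht; cases hw; exact hr.1
          · exact hr.2 t w hw
      have hstep : pvStepA patterns f s (cnt, c) p =
          ((if p = s then cnt + 1 else cnt) + (pvNumPoss patterns f (pvRemoveprefix s p) c).1,
           if ((pvNumPoss patterns f (pvRemoveprefix s p) c).2.get? (pvRemoveprefix s p)).isSome
           then (pvNumPoss patterns f (pvRemoveprefix s p) c).2
           else (pvNumPoss patterns f (pvRemoveprefix s p) c).2.insert (pvRemoveprefix s p)
                  (pvNumPoss patterns f (pvRemoveprefix s p) c).1) := by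
        simp [pvStepA, hsw2]
      rw [hstep]
      have hres := ih (fun q hq => hmem q (by simp [hq]))
          ((if p = s then cnt + 1 else cnt) + (pvNumPoss patterns f (pvRemoveprefix s p) c).1)
          _ hcache'
      refine ⟨?_, hres.2⟩
      rw [hres.1]
      simp only [List.map_cons, List.sum_cons, pvContrib, PySem.Str.startswith_eq, hsw2,
        if_true, hr.1]
      split_ifs <;> ring
    · -- pattern does not match: the loop 'continue's
      have hstep : pvStepA patterns f s (cnt, c) p = (cnt, c) := by simp [pvStepA, hsw2]
      rw [hstep]
      have hres := ih (fun q hq => hmem q (by simp [hq])) cnt c hC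
      refine ⟨?_, hres.2⟩
      rw [hres.1]
      simp [pvContrib, hsw2]

theorem pvSum_eq_pvG (patterns : List String) (hP : ∀ p ∈ patterns, p ≠ "") (s : String) (hs : s ≠ "") :
    (patterns.map (pvContrib patterns s)).sum = pvG patterns (s.toList.length + 1) s.toList := by
  have hsl : s.toList ≠ [] := by
    intro h; exact hs (String.toList_inj.mp (by simp [h]))
  have hspos : 0 < s.toList.length := List.length_pos_iff.mpr hsl
  rw [pvG, if_neg hsl]
  -- one pattern's contribution to the loop equals pvContrib
  have helem : ∀ p ∈ patterns, ∀ (a : Int),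
      (if PySem.Chars.startswith s.toList p.toList = true then
        a + pvG patterns s.toList.length (s.toList.drop p.toList.length) else a)
      = a + pvContrib patterns s p := by
    intro p hp a
    have hpne : p ≠ "" := hP p hp
    by_cases hsw2 : PySem.Chars.startswith s.toList p.toList = true
    · have hpre : p.toList <+: s.toList := (PySem.Chars.startswith_iff _ _).mp hsw2
      have hppos : 0 < p.toList.length := by
        cases hl : p.toList with
        | nil => exact absurd (String.toList_inj.mp (by simp [hl])) hpne
        | cons a t => simp
      have hsuf : (pvRemoveprefix s p).toList = s.toList.drop p.toList.length := by
        simp [pvRemoveprefix, hsw2]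
      rw [if_pos hsw2]
      have hcon : pvContrib patterns s p = pvG patterns s.toList.length (s.toList.drop p.toList.length) := by
        by_cases hps : p = s
        · -- full match: suffix is '', contributes 1 on both sides
          subst hps
          have h1 : pvRemoveprefix p p = "" := by
            apply String.toList_inj.mp
            rw [hsuf]
            simp
          have h3 : pvG patterns p.toList.length [] = 1 := by
            cases hn : p.toList.length with
            | zero => omega
            | succ m => simp [pvG]
          simp [pvContrib, hsw2, h1, pvAV]
          rw [show p.length = p.toList.length by simp, List.drop_length]
          exact h3.symm
        · -- proper prefix: the suffix is nonempty
          have hlt : p.toList.length < s.toList.length := by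
            rcases Nat.lt_or_ge p.toList.length s.toList.length with h | h
            · exact h
            · exfalso
              have := hpre.length_le
              have heq : p.toList = s.toList := hpre.eq_of_length (by omega)
              exact hps (String.toList_inj.mp heq)
          have hsufne : pvRemoveprefix s p ≠ "" := by
            intro h
            have h2 : (pvRemoveprefix s p).toList = [] := by simp [h]
            rw [hsuf] at h2
            have h3 := congrArg List.length h2
            rw [List.length_drop] at h3
            simp only [List.length_nil] at h3
            omega
          have hcon1 : pvContrib patterns s p
              = pvG patterns ((s.toList.drop p.toList.length).length + 1) (s.toList.drop p.toList.length) := by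
            simp [pvContrib, hsw2, hps, pvAV, hsufne, hsuf]
          rw [hcon1, pvG_fuel patterns hP _ _ s.toList.length (by omega)
            (by rw [List.length_drop]; omega)]
      rw [hcon]
    · rw [if_neg hsw2]
      have : pvContrib patterns s p = 0 := by simp [pvContrib, hsw2]
      rw [this, add_zero]
  -- the loop is the running sum of those contributions
  have hloop : ∀ (l : List String), (∀ p ∈ l, p ∈ patterns) → ∀ (a : Int),
      l.foldl (fun (acc : Int) (p : String) =>
        if PySem.Chars.startswith s.toList p.toList = true then
          acc + pvG patterns s.toList.length (s.toList.drop p.toList.length) else acc) a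
      = a + (l.map (pvContrib patterns s)).sum := by
    intro l
    induction l with
    | nil => intro _ a; simp
    | cons p l ih =>
      intro hmem a
      rw [List.foldl_cons, helem p (hmem p (by simp)) a,
        ih (fun q hq => hmem q (by simp [hq])) (a + pvContrib patterns s p),
        List.map_cons, List.sum_cons]
      ring
  have h0 := hloop patterns (fun _ hx => hx) 0
  rw [zero_add] at h0
  exact h0.symm

theorem pvNumPoss_spec (patterns : List String) (hP : ∀ p ∈ patterns, p ≠ "") :
    ∀ (fuel : Nat) (s : String) (c : PySem.Dict String Int),
      pvCacheOK patterns c → s.toList.length < fuel →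
      (pvNumPoss patterns fuel s c).1 = pvAV patterns s ∧
      pvCacheOK patterns (pvNumPoss patterns fuel s c).2 := by
  intro fuel
  induction fuel with
  | zero => intro s c _ h; omega
  | succ f ih =>
    intro s c hC hlen
    rw [pvNumPoss_succ]
    cases hg : c.get? s with
    | some v => exact ⟨hC s v hg, hC⟩
    | none =>
      by_cases hs : s = ""
      · simp [hs, pvAV]
        exact hC
      · simp only [if_neg hs]
        have hf := pvFold_spec patterns hP f s ih hs hlen patterns (fun _ h => h) 0 c hC
        refine ⟨?_, hf.2⟩
        rw [hf.1, zero_add, pvSum_eq_pvG patterns hP s hs, pvAV, if_neg hs]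

theorem pvDp_inv (patterns : List String) (hP : ∀ p ∈ patterns, p ≠ "") (d : List Char) :
    ∀ (k : Nat), k ≤ d.length →
      (((List.range' (d.length - k) k).reverse).foldl (pvDpStep patterns d)
        ((List.replicate (d.length+1) (0:Int)).set d.length 1)).length = d.length + 1 ∧
      ∀ (j : Nat), d.length - k ≤ j → j ≤ d.length →
        (((List.range' (d.length - k) k).reverse).foldl (pvDpStep patterns d)
          ((List.replicate (d.length+1) (0:Int)).set d.length 1)).getD j 0
        = pvG patterns (d.length + 1) (d.drop j) := by
  intro k
  induction k with
  | zero =>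
    intro _
    constructor
    · simp
    · intro j hj1 hj2
      have hj : j = d.length := by omega
      subst hj
      have h1 : (((List.replicate (d.length+1) (0:Int)).set d.length 1)).getD d.length 0 = 1 := by
        rw [List.getD_eq_getElem?_getD]
        simp
      simp only [List.range'_zero, List.reverse_nil, List.foldl_nil]
      rw [h1, List.drop_length]
      simp [pvG]
  | succ k ih =>
    intro hk1
    have hk : k ≤ d.length := by omega
    obtain ⟨ihlen, ihval⟩ := ih hk
    have hidx : d.length - (k+1) + 1 = d.length - k := by omega
    have hrange : (List.range' (d.length - (k+1)) (k+1)).reverse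
        = (List.range' (d.length - k) k).reverse ++ [d.length - (k+1)] := by
      rw [List.range'_succ, List.reverse_cons, hidx]
    rw [hrange, List.foldl_append, List.foldl_cons, List.foldl_nil]
    set dpk := ((List.range' (d.length - k) k).reverse).foldl (pvDpStep patterns d)
      ((List.replicate (d.length+1) (0:Int)).set d.length 1) with hdpk
    have hstep : pvDpStep patterns d dpk (d.length - (k+1))
        = dpk.set (d.length - (k+1)) (patterns.foldl (fun s p =>
            if PySem.Chars.startswith (d.drop (d.length - (k+1))) p.toList
            then s + dpk.getD ((d.length - (k+1)) + p.toList.length) 0 else s) 0) := rfl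
    rw [hstep]
    refine ⟨by simp [ihlen], ?_⟩
    intro j hj1 hj2
    by_cases hji : j = d.length - (k+1)
    · -- the freshly written cell
      rw [show d.length - (k+1) = j from hji.symm]
      have hlt : j < dpk.length := by rw [ihlen]; omega
      have hget : (dpk.set j (patterns.foldl (fun s p =>
            if PySem.Chars.startswith (d.drop j) p.toList
            then s + dpk.getD (j + p.toList.length) 0 else s) 0)).getD j 0
          = patterns.foldl (fun s p =>
            if PySem.Chars.startswith (d.drop j) p.toList
            then s + dpk.getD (j + p.toList.length) 0 else s) 0 := by
        rw [List.getD_eq_getElem?_getD]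
        simp [hlt]
      rw [hget]
      -- now show the freshly computed sum is pvG (n+1) (d.drop j)
      have hjn : j < d.length := by omega
      have hdj : d.drop j ≠ [] := by
        intro h
        have := congrArg List.length h
        rw [List.length_drop] at this
        simp only [List.length_nil] at this
        omega
      rw [pvG, if_neg hdj]
      -- both folds agree pattern by pattern
      have hcong : ∀ (l : List String), (∀ p ∈ l, p ∈ patterns) → ∀ (a : Int),
          l.foldl (fun s p =>
            if PySem.Chars.startswith (d.drop j) p.toList
            then s + dpk.getD (j + p.toList.length) 0 else s) a
          = l.foldl (fun s p =>
            if PySem.Chars.startswith (d.drop j) p.toList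
            then s + pvG patterns d.length ((d.drop j).drop p.toList.length) else s) a := by
        intro l
        induction l with
        | nil => intro _ a; rfl
        | cons p l ihl =>
          intro hmem a
          have hp : p ∈ patterns := hmem p (by simp)
          have hpne : p ≠ "" := hP p hp
          have hppos : 0 < p.toList.length := by
            cases hl : p.toList with
            | nil => exact absurd (String.toList_inj.mp (by simp [hl])) hpne
            | cons a t => simp
          rw [List.foldl_cons, List.foldl_cons]
          by_cases hsw2 : PySem.Chars.startswith (d.drop j) p.toList = true
          · have hpre : p.toList <+: d.drop j := (PySem.Chars.startswith_iff _ _).mp hsw2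
            have hplen : p.toList.length ≤ d.length - j := by
              have := hpre.length_le
              rw [List.length_drop] at this
              omega
            have hv : dpk.getD (j + p.toList.length) 0
                = pvG patterns (d.length + 1) (d.drop (j + p.toList.length)) :=
              ihval (j + p.toList.length) (by omega) (by omega)
            have hg : pvG patterns d.length ((d.drop j).drop p.toList.length)
                = pvG patterns (d.length + 1) (d.drop (j + p.toList.length)) := by
              rw [List.drop_drop]
              exact pvG_fuel patterns hP _ _ _
                (by rw [List.length_drop]; omega) (by rw [List.length_drop]; omega)
            rw [if_pos hsw2, if_pos hsw2, hv, ← hg]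
            exact ihl (fun q hq => hmem q (by simp [hq])) _
          · rw [if_neg hsw2, if_neg hsw2]
            exact ihl (fun q hq => hmem q (by simp [hq])) a
      exact hcong patterns (fun _ hx => hx) 0
    · -- untouched cells keep their value
      have hne : d.length - (k+1) ≠ j := fun h => hji h.symm
      rw [List.getD_eq_getElem?_getD, List.getElem?_set_ne hne, ← List.getD_eq_getElem?_getD]
      exact ihval j (by omega) hj2


-- ===== VERDICT (by name: the statement is the Claim_ definition above) =====
theorem calculate_possibilities_spec : Claim_equal_calculate_possibilities := by
  unfold Claim_equal_calculate_possibilities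
  intro patterns designs _ hPre
  unfold Spec_calculate_possibilities
  unfold Pre_calculate_possibilities at hPre
  have hempty : pvCacheOK patterns PySem.Dict.empty := by
    intro s v h
    simp [PySem.Dict.get?_empty] at h
  show (designs.foldl (fun (acc : Int × PySem.Dict String Int) design =>
          (acc.1 + (pvNumPoss patterns (design.toList.length + 1) design acc.2).1,
           (pvNumPoss patterns (design.toList.length + 1) design acc.2).2)) (0, PySem.Dict.empty)).1
      = designs.foldl (fun (total : Int) design =>
          if design = "" then total
          else total + ((((List.range design.toList.length).reverse).foldl
              (pvDpStep patterns design.toList)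
              ((List.replicate (design.toList.length+1) (0:Int)).set design.toList.length 1)).getD 0 0)) 0
  by_cases hp : "" ∈ patterns
  · -- every design is empty: A's loop leaves the state unchanged and B skips every design
    have hall : ∀ d ∈ designs, d = "" := by
      by_contra h
      simp only [not_forall] at h
      obtain ⟨d, hd1, hd2⟩ := h
      exact hPre ⟨hp, d, hd1, hd2⟩
    have hzero : pvNumPoss patterns ((("" : String)).toList.length + 1) "" PySem.Dict.empty
        = (0, PySem.Dict.empty) := by
      rw [pvNumPoss_succ]
      simp [PySem.Dict.get?_empty]
    have hA0 : ∀ (l : List String), (∀ d ∈ l, d = "") → ∀ (t : Int),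
        (l.foldl (fun (acc : Int × PySem.Dict String Int) design =>
          (acc.1 + (pvNumPoss patterns (design.toList.length + 1) design acc.2).1,
           (pvNumPoss patterns (design.toList.length + 1) design acc.2).2)) (t, PySem.Dict.empty)).1
        = t := by
      intro l
      induction l with
      | nil => intro _ t; rfl
      | cons design l ih =>
        intro hmem t
        have hd : design = "" := hmem design (by simp)
        subst hd
        rw [List.foldl_cons]
        dsimp only
        rw [hzero]
        dsimp only
        rw [add_zero]
        exact ih (fun q hq => hmem q (by simp [hq])) t
    have hB0 : ∀ (l : List String), (∀ d ∈ l, d = "") → ∀ (t : Int),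
        l.foldl (fun (total : Int) design =>
          if design = "" then total
          else total + ((((List.range design.toList.length).reverse).foldl
              (pvDpStep patterns design.toList)
              ((List.replicate (design.toList.length+1) (0:Int)).set design.toList.length 1)).getD 0 0)) t
        = t := by
      intro l
      induction l with
      | nil => intro _ t; rfl
      | cons design l ih =>
        intro hmem t
        have hd : design = "" := hmem design (by simp)
        rw [List.foldl_cons]
        rw [if_pos hd]
        exact ih (fun q hq => hmem q (by simp [hq])) t
    rw [hA0 designs hall 0, hB0 designs hall 0]
  · -- no empty pattern: each design contributes its tiling count on both sides
    have hP : ∀ p ∈ patterns, p ≠ "" := fun p hmem h => hp (h ▸ hmem)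
    have hmain : ∀ (l : List String) (t : Int) (c : PySem.Dict String Int),
        pvCacheOK patterns c →
        (l.foldl (fun (acc : Int × PySem.Dict String Int) design =>
          (acc.1 + (pvNumPoss patterns (design.toList.length + 1) design acc.2).1,
           (pvNumPoss patterns (design.toList.length + 1) design acc.2).2)) (t, c)).1
        = l.foldl (fun (total : Int) design =>
            if design = "" then total
            else total + ((((List.range design.toList.length).reverse).foldl
                (pvDpStep patterns design.toList)
                ((List.replicate (design.toList.length+1) (0:Int)).set design.toList.length 1)).getD 0 0)) t := by
      intro l
      induction l with
      | nil => intro t c hC; rfl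
      | cons design l ih =>
        intro t c hC
        rw [List.foldl_cons, List.foldl_cons]
        dsimp only
        have hr := pvNumPoss_spec patterns hP (design.toList.length + 1) design c hC (by omega)
        rw [hr.1]
        have hBval : (if design = "" then t
            else t + ((((List.range design.toList.length).reverse).foldl
                (pvDpStep patterns design.toList)
                ((List.replicate (design.toList.length+1) (0:Int)).set design.toList.length 1)).getD 0 0))
            = t + pvAV patterns design := by
          by_cases hd0 : design = ""
          · rw [if_pos hd0]
            simp [pvAV, hd0]
          · rw [if_neg hd0]
            have hinv := (pvDp_inv patterns hP design.toList design.toList.length le_rfl).2 0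
              (by omega) (by omega)
            have hrr : List.range' (design.toList.length - design.toList.length) design.toList.length
                = List.range design.toList.length := by
              rw [Nat.sub_self, ← List.range_eq_range']
            rw [hrr, List.drop_zero] at hinv
            simp only [pvAV, if_neg hd0]
            rw [hinv]
        rw [hBval]
        exact ih (t + pvAV patterns design) _ hr.2
    exact hmain designs 0 PySem.Dict.empty hempty
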